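-- pv_equiv track=rewrite | github.com/Sanmaro/Puzzles | CodeWars/thread_pool.py | queue_time
-- ===== SOURCE A (Python) =====
-- def queue_time(customers, n):
--     count = 0
--     if customers:
--         while set(customers) != {"x"}:
--             for i in range(n):
--                 try:
--                     customers[i] -= 1
--                 except (IndexError, TypeError):
--                     continue
--             while 0 in customers:
--                 for customer in customers:
--                     if customer == 0:
--                         customers.remove(customer)
--                         customers.append("x")
--             count += 1
--     return count
-- ===== SOURCE B (Python) =====
-- def queue_time(customers, n):
--     queue = list(customers)
--     total = 0
--     while queue:
--         w = min(n, len(queue))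
--         window = queue[:w]
--         d = min(window)
--         total += d
--         queue = [r - d for r in window if r != d] + queue[w:]
--     return total
-- ===== Notes on version B (the rewrite author's own statement) =====
-- stated objective: faster
-- what changed: B replaces A's unit-time tick simulation (decrement the first n entries each tick, with 'x' sentinels and repeated remove/append passes) by an event-driven loop that jumps straight to the next service completion: d = min of the window of the first n waiting customers, add d to the total, subtract d and drop finished customers in one batch; intended as faster (pseudo-polynomial -> polynomial) — a timing run could not measure a ratio because A timed out at n=16 where B returned.
-- outside the precondition, e.g. on queue_time([0], 0): A returns 1, B raises ValueError
import Mathlib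
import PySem

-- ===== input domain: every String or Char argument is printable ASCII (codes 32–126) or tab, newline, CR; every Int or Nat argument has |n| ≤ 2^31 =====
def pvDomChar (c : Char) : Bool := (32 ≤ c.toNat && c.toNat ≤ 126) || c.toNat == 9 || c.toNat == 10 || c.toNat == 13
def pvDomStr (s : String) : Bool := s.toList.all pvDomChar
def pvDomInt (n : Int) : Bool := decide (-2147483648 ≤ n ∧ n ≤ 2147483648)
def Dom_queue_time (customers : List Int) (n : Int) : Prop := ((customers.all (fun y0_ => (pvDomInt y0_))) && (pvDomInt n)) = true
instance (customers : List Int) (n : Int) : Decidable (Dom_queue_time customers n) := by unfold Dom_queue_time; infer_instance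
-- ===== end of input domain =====

-- B is an event-driven re-implementation of A's per-tick queue simulation: it jumps to the next
-- service completion instead of counting single time ticks (intended as faster; a timing run
-- could not measure a ratio: A timed out at size 16 where B returned).  A mutates its list argument
-- in place while B does not — the equivalence proved here is about the return value only.

-- ===== PORT A =====
-- A's list holds ints and "x" sentinels; we model an entry as Option Int (none = "x").
-- 'for i in range(n): try: customers[i] -= 1 except (IndexError, TypeError): continue'
-- decrements each int entry at a position < n (position i is < n iff 0 < n - i, walked structurally).
def pvWrapDec (n : Int) : List (Option Int) → List (Option Int)
  | [] => []
  | x :: xs => (if 0 < n then x.map (· - 1) else x) :: pvWrapDec (n - 1) xs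

-- 'while 0 in customers: for …: customers.remove(customer); customers.append("x")' — each pass
-- removes the first 0 and appends one "x"; the outer while re-checks until no 0 is left.
def pvRemZeros (L : List (Option Int)) : List (Option Int) :=
  if h : some (0 : Int) ∈ L then pvRemZeros ((L.erase (some 0)) ++ [none])
  else L
termination_by L.count (some 0)
decreasing_by
  have h1 : (L.erase (some (0:Int))).count (some 0) = L.count (some 0) - 1 :=
    List.count_erase_self ..
  have h2 : 0 < L.count (some (0:Int)) := List.count_pos_iff.mpr h
  have h3 : ([(none : Option Int)]).count (some (0:Int)) = 0 := rfl
  simp only [List.count_append, h1, h3]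
  omega

-- 'while set(customers) != {"x"}: … count += 1' — for the (always nonempty) working list this
-- condition is "some int entry remains".  The fuel 1 + Σ max(c,0) bounds the tick count on
-- every input satisfying Pre_ (proved below); it is a totality guard, not an algorithm change.
def pvSimLoop (n : Int) : Nat → List (Option Int) → Int → Int
  | 0, _, count => count
  | fuel + 1, L, count =>
    if L.any Option.isSome then
      pvSimLoop n fuel (pvRemZeros (pvWrapDec n L)) (count + 1)
    else count

def queue_time (customers : List Int) (n : Int) : Int :=
  if customers = [] then 0
  else pvSimLoop n ((customers.map Int.toNat).sum + 1) (customers.map some) 0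

-- ===== PORT B =====
-- Source B: while queue: w = min(n, len(queue)); window = queue[:w]; d = min(window);
--       total += d; queue = [r - d for r in window if r != d] + queue[w:]
-- (min([]) raises ValueError in Python; the port returns the running total there — such inputs
-- are outside Pre_queue_time.)
def pvBLoop (n : Int) (queue : List Int) (total : Int) : Int :=
  if _hq : queue = [] then total
  else
    match hm : PySem.List.min? (PySem.List.slice queue none (some (min n (PySem.List.len queue)))) (fun x => x) with
    | none => total
    | some d =>
        pvBLoop n
          (((PySem.List.slice queue none (some (min n (PySem.List.len queue)))).filter
              (fun r => r ≠ d)).map (fun r => r - d)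
            ++ PySem.List.slice queue (some (min n (PySem.List.len queue))) none)
          (total + d)
termination_by queue.length
decreasing_by
  have hwin : PySem.List.slice queue none (some (min n (PySem.List.len queue)))
      = queue.take (PySem.List.clampIdx queue.length (min n (PySem.List.len queue))) := by
    simp [PySem.List.slice]
  have hrest := PySem.List.slice_some_none queue (min n (PySem.List.len queue))
  have hd : d ∈ PySem.List.slice queue none (some (min n (PySem.List.len queue))) :=
    PySem.List.min?_mem hm
  have hflt : ((PySem.List.slice queue none (some (min n (PySem.List.len queue)))).filter
      (fun r => r ≠ d)).length
      < (PySem.List.slice queue none (some (min n (PySem.List.len queue)))).length := by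
    refine List.length_filter_lt_length_iff_exists.mpr ⟨d, hd, by simp⟩
  simp only [List.length_append, List.length_map, hrest, hwin]
  rw [hwin] at hflt hd
  simp only [List.length_take, List.length_drop] at hflt ⊢
  omega

def queue_time_alt (customers : List Int) (n : Int) : Int :=
  pvBLoop n customers 0

-- ===== PRECONDITION & SPEC =====
-- Pre_ is exactly the region where A terminates: a nonpositive till count with any nonzero
-- customer, a negative customer, or a 0 within the first n positions make A's while loop run
-- forever; the only excluded inputs on which A returns are the degenerate all-zero lists with
-- n ≤ 0, where A counts one phantom tick (returns 1) while B's min() of an empty window raises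
-- ValueError.
def Pre_queue_time (customers : List Int) (n : Int) : Prop :=
  customers = [] ∨
    (1 ≤ n ∧ (∀ c ∈ customers, 0 ≤ c) ∧ (∀ c ∈ customers.take n.toNat, 1 ≤ c))
instance (customers : List Int) (n : Int) : Decidable (Pre_queue_time customers n) := by
  unfold Pre_queue_time; infer_instance

def pvWitness_queue_time : List Int × Int := ([2, 3, 1, 0, 4], 2)

def Spec_queue_time (customers : List Int) (n : Int) (out : Int) : Prop := out = queue_time_alt customers n
instance (customers : List Int) (n : Int) (out : Int) : Decidable (Spec_queue_time customers n out) := by unfold Spec_queue_time; infer_instance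

-- ===== CLAIM (what is proved, stated in full; the proofs are below) =====
def Claim_equal_queue_time : Prop := ∀ (customers : List Int) (n : Int), Dom_queue_time customers n → Pre_queue_time customers n → Spec_queue_time customers n (queue_time customers n)

-- ===== LEMMAS AND PROOFS =====

-- A's working list is always "ints first, then the appended sentinels": wrapL l k.
def wrapL (l : List Int) (k : Nat) : List (Option Int) := l.map some ++ List.replicate k none

-- the int part of one decrement pass
def decI (n : Int) : List Int → List Int
  | [] => []
  | x :: xs => (if 0 < n then x - 1 else x) :: decI (n - 1) xs

-- fuel budget: Σ max(c,0)
def sN (l : List Int) : Nat := (l.map Int.toNat).sum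

theorem pvWrapDec_replicate (n : Int) (k : Nat) :
    pvWrapDec n (List.replicate k none) = List.replicate k none := by
  induction k generalizing n with
  | zero => rfl
  | succ k ih => simp [List.replicate_succ, pvWrapDec, ih]

theorem pvWrapDec_wrap (n : Int) (l : List Int) (k : Nat) :
    pvWrapDec n (wrapL l k) = (decI n l).map some ++ List.replicate k none := by
  induction l generalizing n with
  | nil => simpa [wrapL, decI, pvWrapDec] using pvWrapDec_replicate n k
  | cons x xs ih =>
      simp only [wrapL, List.map_cons, List.cons_append, pvWrapDec, decI] at *
      rw [ih]
      by_cases h : 0 < n <;> simp [h]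

theorem filter_ne_erase (m : List Int) :
    (m.erase 0).filter (fun r => r ≠ 0) = m.filter (fun r => r ≠ 0) := by
  induction m with
  | nil => rfl
  | cons x xs ih =>
      by_cases h : x = 0
      · subst h; simp
      · simp only [ne_eq, decide_not] at ih ⊢
        simp [h, ih]

theorem pvRemZeros_wrap (m : List Int) (k : Nat) :
    pvRemZeros (m.map some ++ List.replicate k none)
      = (m.filter (fun r => r ≠ 0)).map some ++ List.replicate (k + m.count 0) none := by
  induction h : m.count 0 generalizing m k with
  | zero =>
      have h0 : (0 : Int) ∉ m := by
        intro hmem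
        have := List.count_pos_iff.mpr hmem
        omega
      have hne : some (0 : Int) ∉ m.map some ++ List.replicate k none := by
        intro hmem
        rcases List.mem_append.mp hmem with h1 | h1
        · obtain ⟨y, hy, hyy⟩ := List.mem_map.mp h1
          have hy0 : y = 0 := by simpa using hyy
          exact h0 (hy0 ▸ hy)
        · exact absurd (List.eq_of_mem_replicate h1) (by simp)
      have hf : m.filter (fun r => decide (r ≠ 0)) = m := by
        refine List.filter_eq_self.mpr ?_
        intro a ha
        simp only [ne_eq, decide_eq_true_eq]
        intro hc; subst hc; exact h0 ha
      rw [pvRemZeros, dif_neg hne, hf]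
      simp
  | succ c ih =>
      have hm0 : (0 : Int) ∈ m := List.count_pos_iff.mp (by omega)
      have hmem : some (0 : Int) ∈ m.map some ++ List.replicate k none :=
        List.mem_append.mpr (Or.inl (List.mem_map_of_mem hm0))
      rw [pvRemZeros, dif_pos hmem]
      rw [List.erase_append_left _ (List.mem_map_of_mem hm0)]
      have hmap : (m.map some).erase (some 0) = (m.erase 0).map some :=
        (List.map_erase (fun a b h => by simpa using h) m).symm
      rw [hmap, List.append_assoc, ← List.replicate_succ']
      rw [ih (m.erase 0) (k + 1) (by rw [List.count_erase_self]; omega)]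
      rw [filter_ne_erase]
      have : k + 1 + c = k + (c + 1) := by omega
      rw [this]

theorem any_wrap (l : List Int) (k : Nat) :
    (wrapL l k).any Option.isSome = !l.isEmpty := by
  cases l with
  | nil =>
      simp only [wrapL, List.map_nil, List.nil_append, List.isEmpty_nil, Bool.not_true]
      induction k with
      | zero => rfl
      | succ k ih => simp [List.replicate_succ, List.any_cons, ih]
  | cons x xs => simp [wrapL]

theorem pvSimLoop_nil (n : Int) (fuel : Nat) (k : Nat) (t : Int) :
    pvSimLoop n fuel (wrapL [] k) t = t := by
  cases fuel with
  | zero => rfl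
  | succ fuel => simp [pvSimLoop, any_wrap]

theorem pvSimLoop_step (n : Int) (fuel : Nat) (l : List Int) (k : Nat) (t : Int) (hl : l ≠ []) :
    pvSimLoop n (fuel + 1) (wrapL l k) t
      = pvSimLoop n fuel (wrapL ((decI n l).filter (fun r => r ≠ 0)) (k + (decI n l).count 0)) (t + 1) := by
  have hany : (wrapL l k).any Option.isSome = true := by
    rw [any_wrap]; simp [hl]
  simp only [pvSimLoop, hany, if_pos]
  rw [show pvWrapDec n (wrapL l k) = (decI n l).map some ++ List.replicate k none from pvWrapDec_wrap n l k]
  rw [pvRemZeros_wrap]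
  rfl

-- the sentinel count never influences the result
theorem pvSimLoop_k (n : Int) (fuel : Nat) (l : List Int) (k k' : Nat) (t : Int) :
    pvSimLoop n fuel (wrapL l k) t = pvSimLoop n fuel (wrapL l k') t := by
  induction fuel generalizing l k k' t with
  | zero => rfl
  | succ fuel ih =>
      by_cases hl : l = []
      · subst hl; rw [pvSimLoop_nil, pvSimLoop_nil]
      · rw [pvSimLoop_step n fuel l k t hl, pvSimLoop_step n fuel l k' t hl]
        exact ih ..

theorem decI_nonpos (n : Int) (l : List Int) (hn : n ≤ 0) : decI n l = l := by
  induction l generalizing n with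
  | nil => rfl
  | cons x xs ih =>
      simp only [decI]
      rw [if_neg (by omega), ih (n - 1) (by omega)]

theorem decI_take (n : Int) (l : List Int) (hn : 0 ≤ n) :
    decI n l = (l.take n.toNat).map (· - 1) ++ l.drop n.toNat := by
  induction l generalizing n with
  | nil => simp [decI]
  | cons x xs ih =>
      by_cases h : 0 < n
      · have hn1 : n.toNat = (n - 1).toNat + 1 := by omega
        simp only [decI]
        rw [if_pos h, ih (n - 1) (by omega), hn1]
        simp [List.take_succ_cons, List.drop_succ_cons]
      · have h0 : n = 0 := by omega
        subst h0
        simp only [decI]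
        rw [if_neg (by omega), decI_nonpos (0 - 1) xs (by omega)]
        simp

theorem take_min_eq {α : Type} (l : List α) (a : Nat) : l.take (min a l.length) = l.take a := by
  simp

theorem drop_min_eq {α : Type} (l : List α) (a : Nat) : l.drop (min a l.length) = l.drop a := by
  rcases le_total a l.length with h | h
  · rw [Nat.min_eq_left h]
  · rw [Nat.min_eq_right h, List.drop_eq_nil_of_le h, List.drop_eq_nil_of_le (le_refl _)]

-- one unfolding of B's loop, with the Python slices rewritten to take/drop
theorem pvBLoop_step (n d : Int) (q : List Int) (t : Int) (hq : q ≠ []) (hn : 1 ≤ n)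
    (hm : PySem.List.min? (q.take n.toNat) (fun x => x) = some d) :
    pvBLoop n q t
      = pvBLoop n (((q.take n.toNat).filter (fun r => r ≠ d)).map (fun r => r - d) ++ q.drop n.toNat) (t + d) := by
  have hw0 : (0:Int) ≤ min n (PySem.List.len q) := by
    rw [PySem.List.len_eq]
    exact le_min (by omega) (Int.natCast_nonneg _)
  have htn : (min n (PySem.List.len q)).toNat = min n.toNat q.length := by
    rw [PySem.List.len_eq]; omega
  have hslice : PySem.List.slice q none (some (min n (PySem.List.len q))) = q.take n.toNat := by
    rw [PySem.List.slice_to q hw0, htn, take_min_eq]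
  have hslice2 : PySem.List.slice q (some (min n (PySem.List.len q))) none = q.drop n.toNat := by
    rw [PySem.List.slice_from q hw0, htn, drop_min_eq]
  rw [pvBLoop, dif_neg hq]
  split
  · next heq =>
      rw [hslice, hm] at heq; cases heq
  · next d' heq =>
      rw [hslice, hm] at heq
      injection heq with hd; subst hd
      rw [hslice, hslice2]

theorem min?_take_ex (nt : Nat) (q : List Int) (hq : q ≠ []) (hnt : nt ≠ 0) :
    ∃ d, PySem.List.min? (q.take nt) (fun x => x) = some d := by
  cases h : PySem.List.min? (q.take nt) (fun x => x) with
  | none =>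
      have := (PySem.List.min?_eq_none_iff _ _).mp h
      rw [List.take_eq_nil_iff] at this
      tauto
  | some d => exact ⟨d, rfl⟩

theorem shape_take (nt : Nat) (l : List Int) (f : Int → Int) :
    (((l.take nt).map f) ++ l.drop nt).take nt = (l.take nt).map f := by
  rcases le_total nt l.length with h | h
  · exact List.take_left' (by simp [Nat.min_eq_left h])
  · rw [List.drop_eq_nil_of_le h, List.append_nil,
        List.take_of_length_le (by simp)]

theorem shape_drop (nt : Nat) (l : List Int) (f : Int → Int) :
    (((l.take nt).map f) ++ l.drop nt).drop nt = l.drop nt := by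
  rcases le_total nt l.length with h | h
  · exact List.drop_left' (by simp [Nat.min_eq_left h])
  · rw [List.drop_eq_nil_of_le h, List.append_nil,
        List.drop_eq_nil_of_le (by simp)]

theorem filter_shift (w : List Int) (b c : Int) (hc : c = b - 1) :
    (w.map (· - 1)).filter (fun r => r ≠ c) = (w.filter (fun r => r ≠ b)).map (· - 1) := by
  subst hc
  rw [List.filter_map]
  congr 1
  refine List.filter_congr ?_
  intro x _
  have hiff : (x - 1 = b - 1) ↔ (x = b) := by omega
  simp [Function.comp, hiff]

theorem count_shift (w : List Int) (b c : Int) (hc : c = b - 1) :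
    (w.map (· - 1)).count c = w.count b := by
  subst hc
  exact List.count_map_of_injective w (· - 1) (fun a b h => by simpa using h) b

theorem sN_append (a b : List Int) : sN (a ++ b) = sN a + sN b := by
  simp [sN]

theorem sN_cons (x : Int) (a : List Int) : sN (x :: a) = x.toNat + sN a := by
  simp [sN]

theorem sN_map_filter_le (xs : List Int) (p : Int → Bool) (d : Int) (hd : 0 ≤ d) :
    sN ((xs.filter p).map (· - d)) ≤ sN xs := by
  induction xs with
  | nil => simp [sN]
  | cons y ys ih =>
      by_cases h : p y
      · rw [List.filter_cons_of_pos h, List.map_cons, sN_cons, sN_cons]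
        have : (y - d).toNat ≤ y.toNat := by omega
        omega
      · rw [List.filter_cons_of_neg (by simpa using h), sN_cons]
        omega

theorem sN_window (w : List Int) (d : Int) (hd : 1 ≤ d) (hmem : d ∈ w)
    (hmin : ∀ y ∈ w, d ≤ y) :
    sN ((w.filter (fun r => r ≠ d)).map (· - d)) + d.toNat ≤ sN w := by
  induction w with
  | nil => cases hmem
  | cons x xs ih =>
      by_cases hx : x = d
      · subst hx
        rw [List.filter_cons_of_neg (by simp), sN_cons]
        have := sN_map_filter_le xs (fun r => decide (r ≠ x)) x (by omega)
        omega
      · have hmem' : d ∈ xs := by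
          rcases List.mem_cons.mp hmem with h | h
          · exact absurd h.symm hx
          · exact h
        rw [List.filter_cons_of_pos (by simpa using hx), List.map_cons, sN_cons, sN_cons]
        have h1 : (x - d).toNat ≤ x.toNat := by omega
        have := ih hmem' (fun y hy => hmin y (List.mem_cons_of_mem _ hy))
        omega

theorem sN_filter_le (xs : List Int) (p : Int → Bool) : sN (xs.filter p) ≤ sN xs := by
  induction xs with
  | nil => simp
  | cons y ys ih =>
      by_cases h : p y
      · rw [List.filter_cons_of_pos h, sN_cons, sN_cons]; omega
      · rw [List.filter_cons_of_neg (by simpa using h), sN_cons]; omega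

theorem mem_toNat_le_sN (x : Int) (l : List Int) (hx : x ∈ l) : x.toNat ≤ sN l :=
  List.single_le_sum (fun _ _ => Nat.zero_le _) _ (List.mem_map_of_mem hx)

-- A's ticks, batched: d = e+1 unit ticks advance the simulation by exactly one B event
theorem pvSim_event (n : Int) (hn : 1 ≤ n) :
    ∀ (e : Nat) (l : List Int) (k : Nat) (t : Int) (fuel : Nat),
      l ≠ [] → (∀ x ∈ l, 1 ≤ x) →
      ((e : Int) + 1) ∈ l.take n.toNat →
      (∀ y ∈ l.take n.toNat, (e : Int) + 1 ≤ y) →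
      e + 1 ≤ fuel →
      pvSimLoop n fuel (wrapL l k) t
        = pvSimLoop n (fuel - (e + 1))
            (wrapL (((l.take n.toNat).filter (fun r => r ≠ (e : Int) + 1)).map (fun r => r - ((e : Int) + 1)) ++ l.drop n.toNat)
                   (k + (l.take n.toNat).count ((e : Int) + 1)))
            (t + ((e : Int) + 1)) := by
  intro e
  induction e with
  | zero =>
      intro l k t fuel hl h1 hmem hmin hfuel
      obtain ⟨f, rfl⟩ : ∃ f, fuel = f + 1 := ⟨fuel - 1, by omega⟩
      rw [pvSimLoop_step n f l k t hl, decI_take n l (by omega)]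
      simp only [Nat.cast_zero, zero_add, Nat.add_sub_cancel]
      rw [List.filter_append, List.count_append]
      have hdropf : (l.drop n.toNat).filter (fun r => decide (r ≠ 0)) = l.drop n.toNat :=
        List.filter_eq_self.mpr (fun a ha => by
          simp only [ne_eq, decide_eq_true_eq]
          have := h1 a (List.mem_of_mem_drop ha); omega)
      have hdropc : (l.drop n.toNat).count 0 = 0 :=
        List.count_eq_zero.mpr (fun hc => by
          have := h1 0 (List.mem_of_mem_drop hc); omega)
      rw [hdropf, hdropc, filter_shift _ 1 0 (by norm_num), count_shift _ 1 0 (by norm_num),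
          Nat.add_zero]
  | succ e ih =>
      intro l k t fuel hl h1 hmem hmin hfuel
      obtain ⟨f, rfl⟩ : ∃ f, fuel = f + 1 := ⟨fuel - 1, by omega⟩
      push_cast at hmem hmin ⊢
      rw [pvSimLoop_step n f l k t hl, decI_take n l (by omega)]
      have hall : ∀ x ∈ (l.take n.toNat).map (· - 1) ++ l.drop n.toNat, 1 ≤ x := by
        intro x hx
        rcases List.mem_append.mp hx with hx | hx
        · obtain ⟨y, hy, rfl⟩ := List.mem_map.mp hx
          have := hmin y hy; omega
        · exact h1 x (List.mem_of_mem_drop hx)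
      rw [List.filter_eq_self.mpr (fun a ha => by
        simp only [ne_eq, decide_eq_true_eq]
        have := hall a ha; omega)]
      rw [List.count_eq_zero.mpr (fun hc => by have := hall 0 hc; omega), Nat.add_zero]
      have htake₁ : ((l.take n.toNat).map (· - 1) ++ l.drop n.toNat).take n.toNat
          = (l.take n.toNat).map (· - 1) := shape_take _ _ _
      have hdrop₁ : ((l.take n.toNat).map (· - 1) ++ l.drop n.toNat).drop n.toNat
          = l.drop n.toNat := shape_drop _ _ _
      have hl₁ne : (l.take n.toNat).map (· - 1) ++ l.drop n.toNat ≠ [] := by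
        intro hcon
        have : ((e : Int) + 1 + 1) ∈ l.take n.toNat := hmem
        have htne : l.take n.toNat ≠ [] := List.ne_nil_of_mem this
        have : (l.take n.toNat).map (· - 1) ≠ [] := by
          simpa using htne
        rcases List.append_eq_nil_iff.mp hcon with ⟨h1', _⟩
        exact this h1'
      have hmem₁ : ((e : Int) + 1) ∈ ((l.take n.toNat).map (· - 1) ++ l.drop n.toNat).take n.toNat := by
        rw [htake₁]
        exact List.mem_map.mpr ⟨(e : Int) + 1 + 1, hmem, by ring⟩
      have hmin₁ : ∀ y ∈ ((l.take n.toNat).map (· - 1) ++ l.drop n.toNat).take n.toNat,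
          (e : Int) + 1 ≤ y := by
        rw [htake₁]
        intro y hy
        obtain ⟨x, hx, rfl⟩ := List.mem_map.mp hy
        have := hmin x hx; omega
      rw [ih ((l.take n.toNat).map (· - 1) ++ l.drop n.toNat) k (t + 1) f hl₁ne hall hmem₁ hmin₁ (by omega)]
      rw [htake₁, hdrop₁]
      rw [filter_shift (l.take n.toNat) ((e : Int) + 1 + 1) ((e : Int) + 1) (by ring),
          count_shift (l.take n.toNat) ((e : Int) + 1 + 1) ((e : Int) + 1) (by ring)]
      rw [List.map_map]
      have hfun : ((fun r : Int => r - ((e : Int) + 1)) ∘ (fun r : Int => r - 1))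
          = (fun r : Int => r - ((e : Int) + 1 + 1)) := by
        funext x; simp [Function.comp]; ring
      rw [hfun]
      have ht' : t + 1 + ((e : Int) + 1) = t + ((e : Int) + 1 + 1) := by ring
      rw [ht']

theorem pvBLoop_nil (n : Int) (t : Int) : pvBLoop n [] t = t := by
  rw [pvBLoop]; simp

-- core equivalence on all-positive queues: the tick simulation computes B's event loop
theorem pvSim_eq_bLoop (n : Int) (hn : 1 ≤ n) :
    ∀ (N : Nat) (l : List Int), l.length ≤ N → (∀ x ∈ l, 1 ≤ x) →
      ∀ (k : Nat) (t : Int) (fuel : Nat), sN l ≤ fuel →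
      pvSimLoop n fuel (wrapL l k) t = pvBLoop n l t := by
  intro N
  induction N with
  | zero =>
      intro l hlen _ k t fuel _
      have hnil : l = [] := List.length_eq_zero_iff.mp (Nat.le_zero.mp hlen)
      subst hnil
      rw [pvSimLoop_nil, pvBLoop_nil]
  | succ N ih =>
      intro l hlen h1 k t fuel hfuel
      by_cases hl : l = []
      · subst hl; rw [pvSimLoop_nil, pvBLoop_nil]
      · obtain ⟨d, hm⟩ := min?_take_ex n.toNat l hl (by omega)
        have hdmem : d ∈ l.take n.toNat := PySem.List.min?_mem hm
        have hdmin : ∀ y ∈ l.take n.toNat, d ≤ y := fun y hy => PySem.List.min?_isMin hm y hy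
        have hd1 : 1 ≤ d := h1 d (List.mem_of_mem_take hdmem)
        have hdsum : d.toNat ≤ sN l := mem_toNat_le_sN d l (List.mem_of_mem_take hdmem)
        obtain ⟨e, he⟩ : ∃ e : Nat, d = (e : Int) + 1 := ⟨(d - 1).toNat, by omega⟩
        subst he
        rw [pvSim_event n hn e l k t fuel hl h1 hdmem hdmin (by omega)]
        rw [pvBLoop_step n ((e : Int) + 1) l t hl hn hm]
        have hflt : ((l.take n.toNat).filter (fun r => r ≠ (e : Int) + 1)).length
            < (l.take n.toNat).length :=
          List.length_filter_lt_length_iff_exists.mpr ⟨(e : Int) + 1, hdmem, by simp⟩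
        have hlen' : (((l.take n.toNat).filter (fun r => r ≠ (e : Int) + 1)).map
            (fun r => r - ((e : Int) + 1)) ++ l.drop n.toNat).length ≤ N := by
          simp only [List.length_append, List.length_map, List.length_take, List.length_drop] at *
          omega
        have hall' : ∀ x ∈ ((l.take n.toNat).filter (fun r => r ≠ (e : Int) + 1)).map
            (fun r => r - ((e : Int) + 1)) ++ l.drop n.toNat, 1 ≤ x := by
          intro x hx
          rcases List.mem_append.mp hx with hx | hx
          · obtain ⟨y, hy, rfl⟩ := List.mem_map.mp hx
            have hymem := (List.mem_filter.mp hy).1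
            have hyne : y ≠ (e : Int) + 1 := by simpa using (List.mem_filter.mp hy).2
            have := hdmin y hymem
            omega
          · exact h1 x (List.mem_of_mem_drop hx)
        have hsum' : sN (((l.take n.toNat).filter (fun r => r ≠ (e : Int) + 1)).map
            (fun r => r - ((e : Int) + 1)) ++ l.drop n.toNat) ≤ fuel - (e + 1) := by
          have hw := sN_window (l.take n.toNat) ((e : Int) + 1) hd1 hdmem hdmin
          have hsplit : sN l = sN (l.take n.toNat) + sN (l.drop n.toNat) := by
            rw [← sN_append, List.take_append_drop]
          have htn : ((e : Int) + 1).toNat = e + 1 := by omega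
          rw [sN_append]
          omega
        exact ih _ hlen' hall' (k + List.count ((e : Int) + 1) (List.take n.toNat l)) (t + ((e : Int) + 1)) (fuel - (e + 1)) hsum'

theorem filter_idem_ne0 (xs : List Int) :
    (xs.filter (fun r => r ≠ (0:Int))).filter (fun r => r ≠ (0:Int)) = xs.filter (fun r => r ≠ (0:Int)) := by
  rw [List.filter_filter]
  exact List.filter_congr (fun x _ => by by_cases h : x = 0 <;> simp [h])

-- B ignores the zero-valued customers that A's first tick sweeps away for free
theorem pvBLoop_filter (n : Int) (hn : 1 ≤ n) :
    ∀ (N : Nat) (q : List Int), q.length ≤ N → (∀ x ∈ q, 0 ≤ x) → ∀ (t : Int),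
      pvBLoop n q t = pvBLoop n (q.filter (fun r => r ≠ (0:Int))) t := by
  intro N
  induction N with
  | zero =>
      intro q hlen _ t
      have hnil : q = [] := List.length_eq_zero_iff.mp (Nat.le_zero.mp hlen)
      subst hnil; rfl
  | succ N ih =>
      intro q hlen h0 t
      by_cases hq : q = []
      · subst hq; rfl
      by_cases hz2 : (0:Int) ∈ q
      case neg =>
        rw [List.filter_eq_self.mpr (fun a ha => by
          simp only [ne_eq, decide_eq_true_eq]
          intro hc; subst hc; exact hz2 ha)]
      case pos =>
      obtain ⟨d, hm⟩ := min?_take_ex n.toNat q hq (by omega)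
      have hdmem : d ∈ q.take n.toNat := PySem.List.min?_mem hm
      have hdmin : ∀ y ∈ q.take n.toNat, d ≤ y := fun y hy => PySem.List.min?_isMin hm y hy
      have hd0 : 0 ≤ d := h0 d (List.mem_of_mem_take hdmem)
      by_cases hz : (0:Int) ∈ q.take n.toNat
      · -- a zero inside the window: a zero-cost event removes the window zeros
        have hdz : d = 0 := le_antisymm (hdmin 0 hz) hd0
        subst hdz
        rw [pvBLoop_step n 0 q t hq hn hm]
        have hmap0 : ((q.take n.toNat).filter (fun r => r ≠ (0:Int))).map (fun r => r - 0)
            = (q.take n.toNat).filter (fun r => r ≠ (0:Int)) := by simp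
        rw [hmap0, add_zero]
        have hflt : ((q.take n.toNat).filter (fun r => r ≠ (0:Int))).length
            < (q.take n.toNat).length :=
          List.length_filter_lt_length_iff_exists.mpr ⟨0, hz, by simp⟩
        have hlen' : ((q.take n.toNat).filter (fun r => r ≠ (0:Int)) ++ q.drop n.toNat).length ≤ N := by
          simp only [List.length_append, List.length_take, List.length_drop] at *
          omega
        have h0' : ∀ x ∈ (q.take n.toNat).filter (fun r => r ≠ (0:Int)) ++ q.drop n.toNat, 0 ≤ x := by
          intro x hx
          rcases List.mem_append.mp hx with hx | hx
          · exact h0 x (List.mem_of_mem_take (List.mem_filter.mp hx).1)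
          · exact h0 x (List.mem_of_mem_drop hx)
        rw [ih _ hlen' h0' t]
        congr 1
        rw [List.filter_append, filter_idem_ne0, ← List.filter_append]
        conv_rhs => rw [← List.take_append_drop n.toNat q]
      · -- zeros only beyond the window: both sides take the same event
        have hdropz : (0:Int) ∈ q.drop n.toNat := by
          have hz2' := hz2
          conv at hz2' => rw [← List.take_append_drop n.toNat q]
          rcases List.mem_append.mp hz2' with h | h
          · exact absurd h hz
          · exact h
        have hlt : n.toNat < q.length := by
          by_contra hcon
          rw [List.drop_eq_nil_of_le (by omega)] at hdropz
          cases hdropz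
        have htakef : (q.take n.toNat).filter (fun r => r ≠ (0:Int)) = q.take n.toNat :=
          List.filter_eq_self.mpr (fun a ha => by
            simp only [ne_eq, decide_eq_true_eq]
            intro hc; subst hc; exact hz ha)
        have hq0 : q.filter (fun r => r ≠ (0:Int))
            = q.take n.toNat ++ (q.drop n.toNat).filter (fun r => r ≠ (0:Int)) := by
          conv_lhs => rw [← List.take_append_drop n.toNat q]
          rw [List.filter_append, htakef]
        have htake₀ : (q.filter (fun r => r ≠ (0:Int))).take n.toNat = q.take n.toNat := by
          rw [hq0]; exact List.take_left' (by simp [Nat.min_eq_left (le_of_lt hlt)])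
        have hdrop₀ : (q.filter (fun r => r ≠ (0:Int))).drop n.toNat
            = (q.drop n.toNat).filter (fun r => r ≠ (0:Int)) := by
          rw [hq0]; exact List.drop_left' (by simp [Nat.min_eq_left (le_of_lt hlt)])
        have hm₀ : PySem.List.min? ((q.filter (fun r => r ≠ (0:Int))).take n.toNat) (fun x => x)
            = some d := by rw [htake₀]; exact hm
        have hq₀ne : q.filter (fun r => r ≠ (0:Int)) ≠ [] := by
          rw [hq0]
          intro hcon
          rcases List.append_eq_nil_iff.mp hcon with ⟨h1', _⟩
          exact (List.ne_nil_of_mem hdmem) h1'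
        rw [pvBLoop_step n d q t hq hn hm, pvBLoop_step n d _ t hq₀ne hn hm₀]
        rw [htake₀, hdrop₀]
        have hflt : ((q.take n.toNat).filter (fun r => r ≠ d)).length < (q.take n.toNat).length :=
          List.length_filter_lt_length_iff_exists.mpr ⟨d, hdmem, by simp⟩
        have hlen' : (((q.take n.toNat).filter (fun r => r ≠ d)).map (fun r => r - d)
            ++ q.drop n.toNat).length ≤ N := by
          simp only [List.length_append, List.length_map, List.length_take, List.length_drop] at *
          omega
        have h0' : ∀ x ∈ ((q.take n.toNat).filter (fun r => r ≠ d)).map (fun r => r - d)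
            ++ q.drop n.toNat, 0 ≤ x := by
          intro x hx
          rcases List.mem_append.mp hx with hx | hx
          · obtain ⟨y, hy, rfl⟩ := List.mem_map.mp hx
            have := hdmin y (List.mem_filter.mp hy).1
            omega
          · exact h0 x (List.mem_of_mem_drop hx)
        rw [ih _ hlen' h0' (t + d)]
        congr 1
        rw [List.filter_append]
        congr 1
        refine List.filter_eq_self.mpr ?_
        intro a ha
        obtain ⟨y, hy, rfl⟩ := List.mem_map.mp ha
        have hymem := (List.mem_filter.mp hy).1
        have hyne : y ≠ d := by simpa using (List.mem_filter.mp hy).2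
        have := hdmin y hymem
        simp only [ne_eq, decide_eq_true_eq]
        omega

-- A's first tick sweeps the zero-valued customers beyond the window away for free
theorem pvSim_filter (n : Int) (hn : 1 ≤ n) (l : List Int) (k : Nat) (t : Int) (fuel : Nat)
    (_h0 : ∀ x ∈ l, 0 ≤ x) (h1 : ∀ x ∈ l.take n.toNat, 1 ≤ x) :
    pvSimLoop n fuel (wrapL l k) t
      = pvSimLoop n fuel (wrapL (l.filter (fun r => r ≠ (0:Int))) k) t := by
  by_cases hz : (0:Int) ∈ l
  · have hl : l ≠ [] := List.ne_nil_of_mem hz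
    have hzdrop : (0:Int) ∈ l.drop n.toNat := by
      have hz' := hz
      conv at hz' => rw [← List.take_append_drop n.toNat l]
      rcases List.mem_append.mp hz' with h | h
      · have := h1 0 h; omega
      · exact h
    have hlt : n.toNat < l.length := by
      by_contra hcon
      rw [List.drop_eq_nil_of_le (by omega)] at hzdrop
      cases hzdrop
    have htakef : (l.take n.toNat).filter (fun r => r ≠ (0:Int)) = l.take n.toNat :=
      List.filter_eq_self.mpr (fun a ha => by
        simp only [ne_eq, decide_eq_true_eq]
        intro hc; subst hc; have := h1 0 ha; omega)
    have hq0 : l.filter (fun r => r ≠ (0:Int))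
        = l.take n.toNat ++ (l.drop n.toNat).filter (fun r => r ≠ (0:Int)) := by
      conv_lhs => rw [← List.take_append_drop n.toNat l]
      rw [List.filter_append, htakef]
    have htake₀ : (l.filter (fun r => r ≠ (0:Int))).take n.toNat = l.take n.toNat := by
      rw [hq0]; exact List.take_left' (by simp [Nat.min_eq_left (le_of_lt hlt)])
    have hdrop₀ : (l.filter (fun r => r ≠ (0:Int))).drop n.toNat
        = (l.drop n.toNat).filter (fun r => r ≠ (0:Int)) := by
      rw [hq0]; exact List.drop_left' (by simp [Nat.min_eq_left (le_of_lt hlt)])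
    have htne : l.take n.toNat ≠ [] := by
      rw [ne_eq, List.take_eq_nil_iff]
      push Not
      exact ⟨by omega, hl⟩
    have hl₀ : l.filter (fun r => r ≠ (0:Int)) ≠ [] := by
      rw [hq0]
      intro hcon
      rcases List.append_eq_nil_iff.mp hcon with ⟨h1', _⟩
      exact htne h1'
    cases fuel with
    | zero => rfl
    | succ f =>
        rw [pvSimLoop_step n f l k t hl, pvSimLoop_step n f _ k t hl₀]
        rw [decI_take n l (by omega), decI_take n _ (by omega)]
        rw [htake₀, hdrop₀]
        rw [List.filter_append, List.filter_append, filter_idem_ne0]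
        apply pvSimLoop_k
  · rw [List.filter_eq_self.mpr (fun a ha => by
      simp only [ne_eq, decide_eq_true_eq]
      intro hc; subst hc; exact hz ha)]

theorem queue_time_spec : Claim_equal_queue_time := by
  intro customers n _ hpre
  unfold Spec_queue_time queue_time_alt
  by_cases hc : customers = []
  · subst hc
    rw [queue_time, if_pos rfl, pvBLoop_nil]
  · rcases hpre with h | ⟨hn, h0, h1⟩
    · exact absurd h hc
    rw [queue_time, if_neg hc]
    have hwrap : customers.map some = wrapL customers 0 := by simp [wrapL]
    rw [hwrap]
    rw [pvSim_filter n hn customers 0 0 _ h0 h1]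
    have hall : ∀ x ∈ customers.filter (fun r => r ≠ (0:Int)), 1 ≤ x := by
      intro x hx
      have h1' := h0 x (List.mem_filter.mp hx).1
      have h2' : x ≠ 0 := by simpa using (List.mem_filter.mp hx).2
      omega
    rw [pvSim_eq_bLoop n hn customers.length (customers.filter (fun r => r ≠ (0:Int)))
        (by simpa using List.length_filter_le _ _) hall 0 0 _
        (by have := sN_filter_le customers (fun r => decide (r ≠ (0:Int))); simp only [sN] at *; omega)]
    rw [← pvBLoop_filter n hn customers.length customers (le_refl _) h0 0]
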